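-- pv_equiv track=rewrite | github.com/StefanNede/BIO-Practice | codeforces/first_contest/eBinaryInversions.py | solve
-- ===== SOURCE A (Python) =====
-- def getInversions(arr):
--     # for each 1 count the number of 0s that appear in the array after it and that is the result
--     count = 0
--     for i in range(len(arr)):
--         if arr[i] == 1:
--             count += arr[i:].count(0)
--     return count
--
-- def solve(arr):
--     if len(arr) == 2:
--         return 1
--     # consider if the optimum amount of inversions is before any operations are performed
--     # if the array starts with a 1 the most 1s will benefit if the final 1 is turned to a 0
--     if arr[0] == 1:
--         prevInversions = getInversions(arr)
--         for i in range(len(arr)-1, 0, -1):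
--             if arr[i] == 1:
--                 arr[i] = 0
--                 break
--         newInversions = getInversions(arr)
--         if prevInversions > newInversions:
--             return prevInversions
--         else:
--             return newInversions
--
--     # if the array doesn't start with a 1
--     else:
--         return getInversions(arr)
-- ===== SOURCE B (Python) =====
-- def solve(arr):
--     if len(arr) == 2:
--         return 1
--     ones = zeros = inversions = 0
--     zeros_at_last_one = 0
--     for x in arr:
--         if x == 1:
--             ones += 1
--             zeros_at_last_one = zeros
--         elif x == 0:
--             zeros += 1
--             inversions += ones
--     if arr and arr[0] == 1:
--         # flipping the last 1 to a 0: lose the zeros after it, gain the ones before it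
--         flipped = inversions - (zeros - zeros_at_last_one) + (ones - 1)
--         return max(inversions, flipped)
--     return inversions
-- ===== Notes on version B (the rewrite author's own statement) =====
-- stated objective: alternative
-- what changed: Replaces the per-1 suffix rescans and the mutating flip-last-1-then-recount pass with a single fold tracking ones seen, zeros seen, inversions and the zero-count at the last 1, from which the flipped-array inversion count is a closed formula.
import Mathlib
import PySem

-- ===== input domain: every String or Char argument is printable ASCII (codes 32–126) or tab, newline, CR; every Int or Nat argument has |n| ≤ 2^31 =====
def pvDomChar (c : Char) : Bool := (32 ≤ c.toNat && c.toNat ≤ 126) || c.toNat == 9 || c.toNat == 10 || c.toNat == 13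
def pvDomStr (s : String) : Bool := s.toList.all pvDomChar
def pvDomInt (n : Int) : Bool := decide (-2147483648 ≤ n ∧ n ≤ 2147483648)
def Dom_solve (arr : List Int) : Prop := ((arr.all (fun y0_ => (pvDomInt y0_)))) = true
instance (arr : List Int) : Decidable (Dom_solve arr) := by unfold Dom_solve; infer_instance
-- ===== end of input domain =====

-- B replaces A's per-1 suffix rescans (and the flip-last-1-then-recount pass, which mutates
-- A's argument in place — the equivalence proved here is about the RETURN value only; B does
-- not mutate) with a single fold; the flipped-array count becomes a closed formula.


-- ===== PORT A =====
-- for each 1 at index i, count the zeros in arr[i:]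
def getInversions (arr : List Int) : Int :=
  (PySem.List.pyRange 0 arr.length 1).foldl
    (fun count i =>
      if PySem.List.pyGet? arr i = some 1 then
        count + ((PySem.List.slice arr (some i) none).count 0 : Int)
      else count) 0

-- the descending for-loop that sets the last 1 (at an index ≥ 1) to 0 and breaks:
-- returns the (possibly) updated array; pySetD is exact here since arr[i] was just read as some 1
def flipLoop (arr : List Int) : List Int → List Int
  | [] => arr
  | i :: rest =>
    if PySem.List.pyGet? arr i = some 1 then PySem.List.pySetD arr i 0
    else flipLoop arr rest


def solve (arr : List Int) : Int :=
  if arr.length = 2 then 1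
  else
    match PySem.List.pyGet? arr 0 with
    | none => 0
    | some h =>
      if h = 1 then
        let prev := getInversions arr
        let arr' := flipLoop arr (PySem.List.pyRange ((arr.length : Int) - 1) 0 (-1))
        let newInv := getInversions arr'
        if prev > newInv then prev else newInv
      else getInversions arr


-- ===== PORT B =====
-- one loop step over state (ones, zeros, inversions, zeros_at_last_one)
def stepB (s : Int × Int × Int × Int) (x : Int) : Int × Int × Int × Int :=
  if x = 1 then (s.1 + 1, s.2.1, s.2.2.1, s.2.1)
  else if x = 0 then (s.1, s.2.1 + 1, s.2.2.1 + s.1, s.2.2.2)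
  else s

def solve_alt (arr : List Int) : Int :=
  if arr.length = 2 then 1
  else
    let s := arr.foldl stepB (0, 0, 0, 0)
    match arr with
    | [] => s.2.2.1
    | x :: _ =>
      if x = 1 then
        let flipped := s.2.2.1 - (s.2.1 - s.2.2.2) + (s.1 - 1)
        max s.2.2.1 flipped
      else s.2.2.1


-- ===== PRECONDITION & SPEC =====
-- Pre_ excludes only the empty list, on which A raises IndexError reading the first element
def Pre_solve (arr : List Int) : Prop := arr ≠ []
instance (arr : List Int) : Decidable (Pre_solve arr) := by unfold Pre_solve; infer_instance
def pvWitness_solve : List Int := [1, 0, 1]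

def Spec_solve (arr : List Int) (out : Int) : Prop := out = solve_alt arr
instance (arr : List Int) (out : Int) : Decidable (Spec_solve arr out) := by unfold Spec_solve; infer_instance

-- ===== CLAIM (what is proved, stated in full; the proofs are below) =====
def Claim_equal_solve : Prop := ∀ (arr : List Int), Dom_solve arr → Pre_solve arr → Spec_solve arr (solve arr)

-- ===== LEMMAS AND PROOFS =====

-- invA: the inversion count by structural recursion; rflip: flip the LAST 1 to a 0;
-- zb / zafter: zeros strictly before / after the last 1
def invA : List Int → Int
  | [] => 0
  | x :: xs => (if x = 1 then (xs.count 0 : Int) else 0) + invA xs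
def rflip : List Int → List Int
  | [] => []
  | x :: xs => if (1:Int) ∈ xs then x :: rflip xs else if x = 1 then 0 :: xs else x :: xs
def zb : List Int → Int
  | [] => 0
  | x :: xs => if (1:Int) ∈ xs then (if x = 0 then 1 else 0) + zb xs else 0
def zafter : List Int → Int
  | [] => 0
  | x :: xs => if (1:Int) ∈ xs then zafter xs else if x = 1 then (xs.count 0 : Int) else 0

theorem rflip_of_not_mem (l : List Int) (h : (1:Int) ∉ l) : rflip l = l := by
  induction l with
  | nil => rfl
  | cons x xs ih =>
    simp only [List.mem_cons, not_or] at h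
    have hx : x ≠ 1 := fun hh => h.1 hh.symm
    simp [rflip, h.2, hx]

theorem rflip_append (l : List Int) (x : Int) :
    rflip (l ++ [x]) = if x = 1 then l ++ [0] else rflip l ++ [x] := by
  induction l with
  | nil => by_cases hx : x = 1 <;> simp [rflip, hx]
  | cons y l' ih =>
    by_cases hx : x = 1
    · subst hx
      have hmem : (1:Int) ∈ l' ++ [1] := by simp
      simp [rflip, hmem, ih]
    · by_cases h1 : (1:Int) ∈ l'
      · have hmem : (1:Int) ∈ l' ++ [x] := by simp [h1]
        simp [rflip, hmem, h1, ih, hx]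
      · have hmem : (1:Int) ∉ l' ++ [x] := by
          intro hc
          rcases List.mem_append.mp hc with hc | hc
          · exact h1 hc
          · simp at hc; exact hx hc.symm
        by_cases hy : y = 1
        · simp [rflip, hmem, h1, hy, hx]
        · simp [rflip, hmem, h1, hy, hx, rflip_of_not_mem l' h1]

theorem count0_rflip (l : List Int) (h : (1:Int) ∈ l) :
    ((rflip l).count 0 : Int) = (l.count 0 : Int) + 1 := by
  induction l with
  | nil => cases h
  | cons x xs ih =>
    by_cases h1 : (1:Int) ∈ xs
    · simp only [rflip, h1, if_true, List.count_cons]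
      by_cases hx : x = 0 <;> simp [hx] <;> rw [ih h1] <;> ring
    · have hx : x = 1 := by rcases List.mem_cons.mp h with h' | h'; omega; exact absurd h' h1
      have hx0 : x ≠ 0 := by omega
      simp [rflip, h1, hx, List.count_cons]

theorem invA_rflip (l : List Int) (h : (1:Int) ∈ l) :
    invA (rflip l) = invA l - zafter l + (l.count 1 : Int) - 1 := by
  induction l with
  | nil => cases h
  | cons x xs ih =>
    by_cases h1 : (1:Int) ∈ xs
    · have hz : zafter (x :: xs) = zafter xs := by simp [zafter, h1]
      rw [hz]
      by_cases hx : x = 1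
      · have : rflip (x :: xs) = x :: rflip xs := by simp [rflip, h1]
        rw [this]
        simp only [invA, hx, if_true, List.count_cons]
        rw [count0_rflip xs h1, ih h1]
        simp
        push_cast
        ring
      · have : rflip (x :: xs) = x :: rflip xs := by simp [rflip, h1]
        rw [this]
        simp only [invA, hx, if_false, List.count_cons]
        rw [ih h1]
        have h1x : ¬ ((1:Int) = x) := fun hh => hx hh.symm
        simp [hx]
    · have hx : x = 1 := by rcases List.mem_cons.mp h with h' | h'; omega; exact absurd h' h1
      have hc1 : xs.count 1 = 0 := List.count_eq_zero.mpr h1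
      have hr : rflip (x :: xs) = 0 :: xs := by simp [rflip, h1, hx]
      rw [hr]
      simp [invA, zafter, h1, hx, List.count_cons, hc1]

theorem zb_add_zafter (l : List Int) (h : (1:Int) ∈ l) :
    zb l + zafter l = (l.count 0 : Int) := by
  induction l with
  | nil => cases h
  | cons x xs ih =>
    by_cases h1 : (1:Int) ∈ xs
    · simp only [zb, zafter, h1, if_true, List.count_cons]
      by_cases hx : x = 0 <;> simp [hx] <;> rw [← ih h1] <;> push_cast <;> ring
    · have hx : x = 1 := by rcases List.mem_cons.mp h with h' | h'; omega; exact absurd h' h1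
      have hx0 : x ≠ 0 := by omega
      simp [zb, zafter, h1, hx, hx0, List.count_cons]

theorem foldB (l : List Int) (o z v zl : Int) :
    l.foldl stepB (o, z, v, zl) =
      (o + (l.count 1 : Int), z + (l.count 0 : Int),
       v + o * (l.count 0 : Int) + invA l,
       if (1:Int) ∈ l then z + zb l else zl) := by
  induction l generalizing o z v zl with
  | nil => simp [invA, zb]
  | cons x xs ih =>
    rw [List.foldl_cons]
    by_cases hx : x = 1
    · have hs : stepB (o, z, v, zl) x = (o + 1, z, v, z) := by simp [stepB, hx]
      rw [hs, ih]
      have hm : (1:Int) ∈ x :: xs := by simp [hx]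
      simp only [invA, zb, hx, if_true, List.count_cons, hm]
      by_cases h1 : (1:Int) ∈ xs <;> simp [h1, hx, Prod.ext_iff] <;> push_cast <;>
        and_intros <;> first | rfl | ring
    · by_cases hx0 : x = 0
      · have hs : stepB (o, z, v, zl) x = (o, z + 1, v + o, zl) := by simp [stepB, hx, hx0]
        rw [hs, ih]
        have h1x : ¬ ((1:Int) = x) := fun hh => hx hh.symm
        simp only [invA, zb, hx, hx0, if_false, if_true, List.count_cons, List.mem_cons, h1x,
          false_or]
        by_cases h1 : (1:Int) ∈ xs <;> simp [h1, hx, hx0, Prod.ext_iff] <;> push_cast <;>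
          and_intros <;> first | rfl | ring
      · have hs : stepB (o, z, v, zl) x = (o, z, v, zl) := by simp [stepB, hx, hx0]
        rw [hs, ih]
        have h1x : ¬ ((1:Int) = x) := fun hh => hx hh.symm
        have h0x : ¬ ((0:Int) = x) := fun hh => hx0 hh.symm
        simp only [invA, zb, hx, hx0, if_false, List.count_cons, List.mem_cons, h1x, false_or,
          h0x]
        by_cases h1 : (1:Int) ∈ xs <;> simp [h1, hx, hx0, h1x, h0x, Prod.ext_iff]

theorem S_eq (arr : List Int) :
    ((List.range arr.length).map
      (fun k => if arr[k]? = some 1 then ((arr.drop k).count 0 : Int) else 0)).sum = invA arr := by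
  induction arr with
  | nil => simp [invA]
  | cons x xs ih =>
    rw [List.length_cons, List.range_succ_eq_map, List.map_cons, List.map_map, List.sum_cons]
    have h2 : ((List.range xs.length).map
        ((fun k => if (x :: xs)[k]? = some 1 then (((x :: xs).drop k).count 0 : Int) else 0) ∘ Nat.succ)).sum = invA xs := by
      rw [← ih]
      congr 1
    rw [h2]
    by_cases hx : x = 1
    · subst hx
      simp [invA, List.count_cons]
    · simp [invA, hx]

theorem gI_eq (arr : List Int) : getInversions arr = invA arr := by
  have hbody : ∀ (c i : Int), i ∈ PySem.List.pyRange 0 arr.length 1 →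
      (if PySem.List.pyGet? arr i = some 1 then
        c + ((PySem.List.slice arr (some i) none).count 0 : Int) else c)
      = c + (if PySem.List.pyGet? arr i = some 1 then
          ((PySem.List.slice arr (some i) none).count 0 : Int) else 0) := by
    intro c i _
    split <;> simp
  unfold getInversions
  rw [PySem.List.foldl_congr_mem _ _ _ _ hbody, PySem.List.foldl_add, PySem.List.pyRange_one]
  rw [List.map_map]
  simp only [Function.comp_def, zero_add, Int.sub_zero, Int.toNat_natCast,
    PySem.List.pyGet?_natCast, PySem.List.slice_from_natCast]
  exact S_eq arr
def descFlip (arr : List Int) : Nat → List Int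
  | 0 => arr
  | (m+1) =>
    if PySem.List.pyGet? arr ((m:Int)+1) = some 1 then PySem.List.pySetD arr ((m:Int)+1) 0
    else descFlip arr m

theorem flipLoop_eq_descFlip (arr : List Int) (m : Nat) :
    flipLoop arr (PySem.List.pyRange (m:Int) 0 (-1)) = descFlip arr m := by
  induction m with
  | zero => rw [PySem.List.pyRange_neg_one_eq_nil (by omega)]; rfl
  | succ m ih =>
    rw [PySem.List.pyRange_neg_one_cons (by exact_mod_cast Nat.succ_pos m)]
    simp only [flipLoop, descFlip, Nat.cast_add, Nat.cast_one, add_sub_cancel_right]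
    rw [ih]

theorem descFlip_append (arr : List Int) (x : Int) (m : Nat) (hm : m < arr.length) :
    descFlip (arr ++ [x]) m = descFlip arr m ++ [x] := by
  induction m with
  | zero => rfl
  | succ m ih =>
    have hm' : m < arr.length := by omega
    have hg : PySem.List.pyGet? (arr ++ [x]) ((m:Int)+1) = PySem.List.pyGet? arr ((m:Int)+1) := by
      have h1 : ((m:Int)+1) = ((m+1 : Nat) : Int) := by push_cast; ring
      rw [h1, PySem.List.pyGet?_natCast, PySem.List.pyGet?_natCast,
        List.getElem?_append_left hm]
    simp only [descFlip, hg]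
    by_cases hv : PySem.List.pyGet? arr ((m:Int)+1) = some 1
    · have h1 : ((m:Int)+1) = ((m+1 : Nat) : Int) := by push_cast; ring
      rw [if_pos hv, if_pos hv, h1, PySem.List.pySetD_natCast, PySem.List.pySetD_natCast,
        List.set_append]
      simp [hm]
    · rw [if_neg hv, if_neg hv, ih hm']

theorem descFlip_spec (h : Int) (t : List Int) :
    descFlip (h :: t) t.length = h :: rflip t := by
  induction t using List.reverseRecOn with
  | nil => rfl
  | append_singleton t' x ih =>
    have hlen : (t' ++ [x]).length = t'.length + 1 := by simp
    rw [hlen]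
    have hidx : ((t'.length : Int) + 1) = (((h :: t').length : Nat) : Int) := by
      simp [List.length_cons]
    have hcons : h :: (t' ++ [x]) = (h :: t') ++ [x] := by simp
    simp only [descFlip, hidx, hcons]
    rw [PySem.List.pyGet?_append_length]
    by_cases hx : x = 1
    · subst hx
      rw [if_pos rfl, PySem.List.pySetD_natCast, List.set_append]
      simp [rflip_append]
    · rw [if_neg (by simp [hx])]
      rw [descFlip_append _ _ _ (by simp), ih, rflip_append, if_neg hx]
      simp
theorem ite_gt_eq_max (a b : Int) : (if a > b then a else b) = max a b := by
  rw [max_def]; split_ifs <;> omega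

theorem solve_spec' (arr : List Int) (hne : arr ≠ []) : solve arr = solve_alt arr := by
  obtain ⟨h, t, rfl⟩ : ∃ h t, arr = h :: t := by
    cases arr with
    | nil => exact absurd rfl hne
    | cons a l => exact ⟨a, l, rfl⟩
  by_cases hlen : (h :: t).length = 2
  · simp [solve, solve_alt, hlen]
  · unfold solve solve_alt
    rw [if_neg hlen, if_neg hlen, PySem.List.pyGet?_zero_cons]
    simp only [foldB, List.mem_cons, gI_eq]
    by_cases hx : h = 1
    · subst hx
      have hflip : flipLoop (1 :: t) (PySem.List.pyRange (((1 :: t).length : Int) - 1) 0 (-1))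
          = 1 :: rflip t := by
        have hc : (((1 :: t).length : Int) - 1) = (t.length : Int) := by
          simp [List.length_cons]
        rw [hc, flipLoop_eq_descFlip, descFlip_spec]
      rw [hflip, ite_gt_eq_max]
      simp only [eq_self_iff_true, true_or, if_true]
      have hc0 : (1 :: t).count 0 = t.count 0 := by simp [List.count_cons]
      have hc1 : (1 :: t).count 1 = t.count 1 + 1 := by simp [List.count_cons]
      have hinvc : invA (1 :: t) = (t.count 0 : Int) + invA t := by
        simp [invA]
      by_cases h1 : (1:Int) ∈ t
      · have hnew : invA (1 :: rflip t) = (t.count 0 : Int) + 1 + (invA t - zafter t + (t.count 1 : Int) - 1) := by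
          simp only [invA, eq_self_iff_true, if_true]
          rw [count0_rflip t h1, invA_rflip t h1]
        have hzb : zb (1 :: t) = zb t := by simp [zb, h1]
        have hz := zb_add_zafter t h1
        rw [hnew, hzb, hc0, hc1, hinvc]
        congr 1
        · ring
        · push_cast
          omega
      · have hr : rflip t = t := rflip_of_not_mem t h1
        have hzb : zb (1 :: t) = 0 := by simp [zb, h1]
        have hcc1 : t.count 1 = 0 := List.count_eq_zero.mpr h1
        rw [hr, hzb, hc0, hc1, hcc1, hinvc]
        push_cast
        rw [max_self, max_def]
        split_ifs <;> omega
    · rw [if_neg hx, if_neg hx]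
      ring

-- ===== VERDICT (by name: the statement is the Claim_ definition above) =====
theorem solve_spec : Claim_equal_solve := by
  intro arr _ hpre
  unfold Spec_solve
  exact solve_spec' arr hpre
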